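-- pv_equiv track=rewrite | github.com/dlgksqls/python_java_algorithm | 프로그래머스/lv1/42840. 모의고사/모의고사.py | solution
-- ===== SOURCE A (Python) =====
-- def solution(answers):
--     answer = []
--
--     first = [1,2,3,4,5]
--     second = [2,1,2,3,2,4,2,5]
--     third = [3,3,1,1,2,2,4,4,5,5]
--
--     result = [0 for i in range(3)]
--
--     for i in range(len(answers)):
--         if answers[i] == first[i%len(first)]:
--             result[0] += 1
--         if answers[i] == second[i%len(second)]:
--             result[1] += 1
--         if answers[i] == third[i%len(third)]:
--             result[2] += 1
--
--     for j in range(len(result)):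
--         if max(result) == result[j]:
--             answer.append(j+1)
--
--     return answer
-- ===== SOURCE B (Python) =====
-- def solution(answers):
--     first = [1, 2, 3, 4, 5]
--     second = [2, 1, 2, 3, 2, 4, 2, 5]
--     third = [3, 3, 1, 1, 2, 2, 4, 4, 5, 5]
--
--     # Histogram of (position mod 40, answer value); 40 = lcm(5, 8, 10), so every
--     # guesser's prediction is a function of the residue alone.  Scoring then walks
--     # the <= 200 distinct buckets instead of the n answers.
--     hist = {}
--     for i, a in enumerate(answers):
--         key = (i % 40, a)
--         hist[key] = hist.get(key, 0) + 1
--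
--     s0 = s1 = s2 = 0
--     for (r, v), c in hist.items():
--         if v == first[r % 5]:
--             s0 += c
--         if v == second[r % 8]:
--             s1 += c
--         if v == third[r % 10]:
--             s2 += c
--
--     scores = [s0, s1, s2]
--     m = max(scores)
--     return [j + 1 for j, s in enumerate(scores) if s == m]
-- ===== Notes on version B (the rewrite author's own statement) =====
-- stated objective: alternative
-- what changed: B replaces A's per-index scan comparing each answer against the three cyclic patterns with a two-phase bucket counting scheme: it builds a frequency dictionary keyed by (position mod 40, answer value) -- 40 = lcm of the pattern lengths, so each guesser's prediction depends only on that residue -- and then scores the at most 200 buckets by weighted sums, instead of testing every answer three times.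
import Mathlib
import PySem

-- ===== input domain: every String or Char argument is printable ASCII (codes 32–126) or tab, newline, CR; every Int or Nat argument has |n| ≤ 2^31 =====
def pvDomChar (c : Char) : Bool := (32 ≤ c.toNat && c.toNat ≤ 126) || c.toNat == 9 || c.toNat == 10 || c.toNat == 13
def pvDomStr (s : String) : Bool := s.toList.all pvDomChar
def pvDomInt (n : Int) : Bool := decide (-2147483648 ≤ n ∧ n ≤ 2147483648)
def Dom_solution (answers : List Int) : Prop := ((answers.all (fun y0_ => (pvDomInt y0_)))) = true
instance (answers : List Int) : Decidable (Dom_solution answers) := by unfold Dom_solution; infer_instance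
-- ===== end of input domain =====

-- B is a different algorithm: a frequency dict keyed by (i % 40, answer) — 40 = lcm of
-- the pattern lengths — then weighted scoring of the ≤ 200 buckets, instead of A's
-- per-index scan comparing every answer against the three patterns.

-- shared pattern constants and the cyclic lookup pat[i % len(pat)] both Pythons write inline
def pvFirst : List Int := [1, 2, 3, 4, 5]
def pvSecond : List Int := [2, 1, 2, 3, 2, 4, 2, 5]
def pvThird : List Int := [3, 3, 1, 1, 2, 2, 4, 4, 5, 5]

def patAt (pat : List Int) (i : Int) : Int :=
  PySem.List.pyGetD pat (PySem.Int.mod i (pat.length : Int)) 0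

-- ===== PORT A =====
-- A's loop body: the three ifs updating result[0], result[1], result[2]
def pvStepA (answers : List Int) (r : Int × Int × Int) (i : Int) : Int × Int × Int :=
  let a := PySem.List.pyGetD answers i 0
  let r0 := if a = patAt pvFirst i then r.1 + 1 else r.1
  let r1 := if a = patAt pvSecond i then r.2.1 + 1 else r.2.1
  let r2 := if a = patAt pvThird i then r.2.2 + 1 else r.2.2
  (r0, r1, r2)

def solution (answers : List Int) : List Int :=
  let result := (PySem.List.pyRange 0 (answers.length : Int) 1).foldl (pvStepA answers) (0, 0, 0)
  let rl : List Int := [result.1, result.2.1, result.2.2]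
  (PySem.List.pyRange 0 3 1).foldl
    (fun acc j => if (PySem.List.max? rl (fun x => x)).getD 0 = PySem.List.pyGetD rl j 0 then acc ++ [j + 1] else acc) []

-- ===== PORT B =====
-- B's bucket-scoring loop body: the three ifs adding the bucket count c
def pvStepB (s : Int × Int × Int) (kv : (Int × Int) × Int) : Int × Int × Int :=
  let r := kv.1.1
  let v := kv.1.2
  let c := kv.2
  let s0 := if v = patAt pvFirst r then s.1 + c else s.1
  let s1 := if v = patAt pvSecond r then s.2.1 + c else s.2.1
  let s2 := if v = patAt pvThird r then s.2.2 + c else s.2.2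
  (s0, s1, s2)

def solution_alt (answers : List Int) : List Int :=
  let hist := (PySem.List.enumerate answers).foldl
    (fun (d : PySem.Dict (Int × Int) Int) p =>
      let key := (PySem.Int.mod p.1 40, p.2)
      d.insert key (d.getD key 0 + 1)) PySem.Dict.empty
  let s := hist.items.foldl pvStepB (0, 0, 0)
  let scores : List Int := [s.1, s.2.1, s.2.2]
  let m := (PySem.List.max? scores (fun x => x)).getD 0
  ((PySem.List.enumerate scores).filter (fun p => decide (p.2 = m))).map (fun p => p.1 + 1)

-- ===== PRECONDITION & SPEC =====
def Spec_solution (answers : List Int) (out : List Int) : Prop := out = solution_alt answers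
instance (answers : List Int) (out : List Int) : Decidable (Spec_solution answers out) := by unfold Spec_solution; infer_instance

-- ===== CLAIM (what is proved, stated in full; the proofs are below) =====
def Claim_equal_solution : Prop := ∀ (answers : List Int), Dom_solution answers → Spec_solution answers (solution answers)

-- ===== LEMMAS AND PROOFS =====

-- A's score for one pattern, over a prefix (a countP over the enumerated list)
def pvCnt (pat : List Int) (xs : List Int) : Int :=
  ((PySem.List.enumerate xs).countP (fun p => decide (p.2 = patAt pat p.1)) : Int)

theorem enumerate_append_singleton (xs : List Int) (x : Int) (s : Int) :
    PySem.List.enumerate (xs ++ [x]) s = PySem.List.enumerate xs s ++ [(s + (xs.length : Int), x)] := by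
  induction xs generalizing s with
  | nil => simp [PySem.List.enumerate]
  | cons y ys ih =>
      simp [PySem.List.enumerate, ih (s + 1)]
      ring_nf

theorem pvCnt_concat (pat : List Int) (xs : List Int) (x : Int) :
    pvCnt pat (xs ++ [x]) =
      pvCnt pat xs + (if x = patAt pat (xs.length : Int) then 1 else 0) := by
  unfold pvCnt
  rw [enumerate_append_singleton, List.countP_append]
  simp [List.countP_cons]

theorem loopA_eq_cnt (answers : List Int) (n : ℕ) (h : n ≤ answers.length) :
    (PySem.List.pyRange 0 (n : Int) 1).foldl (pvStepA answers) (0, 0, 0) =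
      (pvCnt pvFirst (answers.take n), pvCnt pvSecond (answers.take n),
        pvCnt pvThird (answers.take n)) := by
  induction n with
  | zero => simp [PySem.List.pyRange_one_eq_nil, pvCnt]
  | succ k ih =>
      have hk : k ≤ answers.length := Nat.le_of_succ_le h
      have hklt : k < answers.length := h
      have hsplit : (PySem.List.pyRange 0 ((k + 1 : ℕ) : Int) 1) =
          PySem.List.pyRange 0 (k : Int) 1 ++ [(k : Int)] := by
        push_cast
        exact PySem.List.pyRange_one_succ_right (by positivity)
      rw [hsplit, List.foldl_append, ih hk]
      have htake : answers.take (k + 1) = answers.take k ++ [answers[k]] := by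
        rw [List.take_add_one, List.getElem?_eq_getElem hklt]
        rfl
      have hlen : ((answers.take k).length : Int) = (k : Int) := by
        simp [List.length_take, Nat.min_eq_left hk]
      have hget : PySem.List.pyGetD answers (k : Int) 0 = answers[k] := by
        simp [PySem.List.pyGetD_natCast, List.getD_eq_getElem?_getD,
          List.getElem?_eq_getElem hklt]
      rw [htake, pvCnt_concat, pvCnt_concat, pvCnt_concat, hlen]
      simp only [pvStepA, List.foldl_cons, List.foldl_nil, hget]
      split_ifs <;> simp

-- ===== B side =====

-- B's bucket keys: (i mod 40, answers[i]) for every index i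
def pvKeys (answers : List Int) : List (Int × Int) :=
  (PySem.List.enumerate answers).map (fun p => (PySem.Int.mod p.1 40, p.2))

-- one weighted bucket sum
def pvW (pat : List Int) (l : List ((Int × Int) × Int)) : Int :=
  (l.map (fun kv => if kv.1.2 = patAt pat kv.1.1 then kv.2 else 0)).sum

theorem stepB_fold (l : List ((Int × Int) × Int)) (s : Int × Int × Int) :
    l.foldl pvStepB s = (s.1 + pvW pvFirst l, s.2.1 + pvW pvSecond l, s.2.2 + pvW pvThird l) := by
  induction l generalizing s with
  | nil => simp [pvW]
  | cons kv t ih =>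
      rw [List.foldl_cons, ih]
      simp only [pvStepB, pvW, List.map_cons, List.sum_cons]
      split_ifs <;> simp <;> try ring
      all_goals decide

-- summing an indicator over a Nodup list containing a picks out a's term
theorem sum_indicator_single {K : Type} [DecidableEq K] (p : K → Bool) (a : K)
    (s : List K) (hnd : s.Nodup) (ha : a ∈ s) :
    (s.map (fun k => if p k ∧ k = a then (1 : Int) else 0)).sum = if p a then 1 else 0 := by
  induction s with
  | nil => cases ha
  | cons x t ih =>
      rcases List.nodup_cons.mp hnd with ⟨hx, hnt⟩
      rcases List.mem_cons.mp ha with rfl | hat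
      · have : (t.map (fun k => if p k ∧ k = a then (1 : Int) else 0)) =
            t.map (fun _ => (0 : Int)) := by
          apply List.map_congr_left
          intro k hk
          have : k ≠ a := fun h => hx (h ▸ hk)
          simp [this]
        simp [this]
      · have hxa : x ≠ a := fun h => hx (h ▸ hat)
        simp [ih hnt hat, hxa]

-- weighted counts over any Nodup superset of ks's elements recover countP over ks
theorem sum_weighted_count {K : Type} [DecidableEq K] (p : K → Bool) (ks s : List K)
    (hnd : s.Nodup) (hcov : ∀ x ∈ ks, x ∈ s) :
    (s.map (fun k => if p k then (ks.count k : Int) else 0)).sum = (ks.countP p : Int) := by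
  induction ks with
  | nil => simp
  | cons a t ih =>
      have hcov' : ∀ x ∈ t, x ∈ s := fun x hx => hcov x (List.mem_cons_of_mem _ hx)
      have ha : a ∈ s := hcov a List.mem_cons_self
      have hsplit : ∀ k, (if p k then (((a :: t).count k : ℕ) : Int) else 0) =
          (if p k then (t.count k : Int) else 0) + (if p k ∧ k = a then (1 : Int) else 0) := by
        intro k
        by_cases hk : k = a
        · subst hk
          by_cases hp : p k
          · simp only [hp, List.count_cons_self, if_true, and_true]
            push_cast
            ring
          · simp [hp]
        · have hak : ¬a = k := fun h => hk h.symm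
          have hc : (a :: t).count k = t.count k := by
            rw [List.count_cons]
            simp [hak]
          rw [hc]
          simp [hk]
      calc (s.map (fun k => if p k then (((a :: t).count k : ℕ) : Int) else 0)).sum
          = (s.map (fun k => (if p k then (t.count k : Int) else 0) +
              (if p k ∧ k = a then (1 : Int) else 0))).sum := by
            rw [List.map_congr_left (fun k _ => hsplit k)]
        _ = (s.map (fun k => if p k then (t.count k : Int) else 0)).sum +
              (s.map (fun k => if p k ∧ k = a then (1 : Int) else 0)).sum := by
            rw [← List.sum_map_add]
        _ = (t.countP p : Int) + (if p a then 1 else 0) := by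
            rw [ih hcov', sum_indicator_single p a s hnd ha]
        _ = ((a :: t).countP p : Int) := by
            rw [List.countP_cons]
            by_cases hp : p a <;> simp [hp]

-- List.count does not depend on which (lawful) BEq instance computes it
theorem pvCount_eq (k : Int × Int) (l : List (Int × Int)) :
    @List.count _ instBEqProd k l = @List.count _ instBEqOfDecidableEq k l := by
  induction l with
  | nil => rfl
  | cons x t ih =>
      rw [@List.count_cons _ instBEqProd, @List.count_cons _ instBEqOfDecidableEq, ih]
      have hx : (@BEq.beq _ instBEqProd x k) = (@BEq.beq _ instBEqOfDecidableEq x k) := by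
        simp
      simp [hx]

-- the histogram loop builds Counter(pvKeys answers)
theorem hist_eq_counter (answers : List Int) :
    (PySem.List.enumerate answers).foldl
      (fun (d : PySem.Dict (Int × Int) Int) p =>
        let key := (PySem.Int.mod p.1 40, p.2)
        d.insert key (d.getD key 0 + 1)) PySem.Dict.empty =
    PySem.Dict.counter (pvKeys answers) := by
  rw [← PySem.Dict.foldl_insert_getD_add_one_eq_counter, pvKeys, List.foldl_map]

-- residues mod 40 index the patterns exactly (5, 8, 10 all divide 40)
theorem patAt_mod40 (pat : List Int) (hpos : 0 < pat.length)
    (hdvd : (pat.length : Int) ∣ 40) (i : Int) :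
    patAt pat (PySem.Int.mod i 40) = patAt pat i := by
  unfold patAt
  congr 1
  have hL : (0 : Int) < (pat.length : Int) := by exact_mod_cast hpos
  rw [PySem.Int.mod_eq_emod_of_pos (by norm_num : (0:Int) < 40),
    PySem.Int.mod_eq_emod_of_pos hL, PySem.Int.mod_eq_emod_of_pos hL]
  exact Int.emod_emod_of_dvd i hdvd

-- B's weighted bucket sum equals A's direct count, per pattern
theorem pvW_counter (pat : List Int) (hpos : 0 < pat.length)
    (hdvd : (pat.length : Int) ∣ 40) (answers : List Int) :
    pvW pat (PySem.Dict.counter (pvKeys answers)).items = pvCnt pat answers := by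
  rw [PySem.Dict.items_counter]
  unfold pvW
  rw [List.map_map]
  have hmap : ((PySem.Set.ofList (pvKeys answers)).map
      ((fun (kv : (Int × Int) × Int) => if kv.1.2 = patAt pat kv.1.1 then kv.2 else 0) ∘
        fun k => (k, ((pvKeys answers).count k : Int)))) =
      (PySem.Set.ofList (pvKeys answers)).map
        (fun k => if (fun (k : Int × Int) => decide (k.2 = patAt pat k.1)) k then
          ((@List.count _ instBEqOfDecidableEq k (pvKeys answers) : ℕ) : Int) else 0) := by
    apply List.map_congr_left
    intro k _
    simp only [Function.comp_apply]
    rw [pvCount_eq]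
    by_cases h : k.2 = patAt pat k.1 <;> simp [h]
  rw [hmap]
  have hs := sum_weighted_count (fun k : Int × Int => decide (k.2 = patAt pat k.1))
    (pvKeys answers) (PySem.Set.ofList (pvKeys answers)) (PySem.Set.nodup_ofList _)
    (fun x hx => (PySem.Set.mem_ofList _ _).mpr hx)
  refine hs.trans ?_
  unfold pvCnt pvKeys
  rw [List.countP_map]
  congr 1
  apply List.countP_congr
  intro p _
  simp only [Function.comp]
  rw [patAt_mod40 pat hpos hdvd]

-- the output-assembly step: A's range-3 append loop vs B's enumerate/filter/map, for any scores
theorem assemble_eq (s0 s1 s2 m : Int) :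
    (PySem.List.pyRange 0 3 1).foldl
        (fun acc j => if m = PySem.List.pyGetD [s0, s1, s2] j 0 then acc ++ [j + 1] else acc) [] =
      ((PySem.List.enumerate [s0, s1, s2]).filter (fun p => decide (p.2 = m))).map (fun p => p.1 + 1) := by
  have h3 : PySem.List.pyRange 0 3 1 = [0, 1, 2] := by decide
  rw [h3]
  simp only [List.foldl_cons, List.foldl_nil, PySem.List.enumerate, List.filter]
  have g0 : PySem.List.pyGetD [s0, s1, s2] 0 0 = s0 := by
    simp [PySem.List.pyGetD, PySem.List.pyGet?, PySem.List.pyIdx?]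
  have g1 : PySem.List.pyGetD [s0, s1, s2] 1 0 = s1 := by
    simp [PySem.List.pyGetD, PySem.List.pyGet?, PySem.List.pyIdx?]
  have g2 : PySem.List.pyGetD [s0, s1, s2] 2 0 = s2 := by
    simp [PySem.List.pyGetD, PySem.List.pyGet?, PySem.List.pyIdx?]
  rw [g0, g1, g2]
  by_cases h0 : s0 = m <;> by_cases h1 : s1 = m <;> by_cases h2 : s2 = m <;>
    simp [h0, h1, h2, eq_comm]

-- ===== VERDICT (by name: the statement is the Claim_ definition above) =====
theorem solution_spec : Claim_equal_solution := by
  intro answers _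
  unfold Spec_solution solution solution_alt
  have hloop := loopA_eq_cnt answers answers.length le_rfl
  rw [List.take_length] at hloop
  have hB : ((PySem.List.enumerate answers).foldl
      (fun (d : PySem.Dict (Int × Int) Int) p =>
        let key := (PySem.Int.mod p.1 40, p.2)
        d.insert key (d.getD key 0 + 1)) PySem.Dict.empty).items.foldl pvStepB (0, 0, 0) =
      (pvCnt pvFirst answers, pvCnt pvSecond answers, pvCnt pvThird answers) := by
    rw [hist_eq_counter, stepB_fold]
    rw [pvW_counter pvFirst (by decide) (by decide), pvW_counter pvSecond (by decide) (by decide),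
      pvW_counter pvThird (by decide) (by decide)]
    simp
  simp only [hloop, hB]
  exact assemble_eq _ _ _ _
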